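-- pv_equiv track=rewrite | github.com/notyetaperson/Botnet-Builder | iot_scanner.py | extract_upnp_device_type
-- ===== SOURCE A (Python) =====
-- def extract_upnp_device_type(data):
--     """Extract UPnP device type from response"""
--     try:
--         lines = data.split('\r\n')
--         for line in lines:
--             if line.startswith('ST:'):
--                 return line.split(':', 1)[1].strip()
--     except:
--         pass
--     return 'Unknown'
-- ===== SOURCE B (Python) =====
-- def extract_upnp_device_type(data):
--     """Extract UPnP device type from response"""
--     headers = {}
--     for line in data.split('\r\n'):
--         if ':' in line:
--             key, value = line.split(':', 1)
--             headers.setdefault(key, value.strip())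
--     return headers.get('ST', 'Unknown')
-- ===== Notes on version B (the rewrite author's own statement) =====
-- stated objective: idiomatic
-- what changed: B parses all headers into a first-wins dict (setdefault) in one pass and finishes with headers.get('ST', 'Unknown'), instead of A's scan that early-returns on the first line starting with 'ST:'.
import Mathlib
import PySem

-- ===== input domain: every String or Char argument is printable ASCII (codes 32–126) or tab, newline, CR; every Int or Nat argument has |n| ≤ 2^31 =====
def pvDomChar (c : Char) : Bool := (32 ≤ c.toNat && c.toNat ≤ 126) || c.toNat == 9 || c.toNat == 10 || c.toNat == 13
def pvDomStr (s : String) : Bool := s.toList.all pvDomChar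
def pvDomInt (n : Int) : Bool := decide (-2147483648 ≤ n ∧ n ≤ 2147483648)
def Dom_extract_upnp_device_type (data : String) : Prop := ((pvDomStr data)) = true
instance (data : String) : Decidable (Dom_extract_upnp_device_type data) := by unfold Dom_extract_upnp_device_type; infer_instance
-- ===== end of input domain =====

-- B builds a first-wins header dictionary in one pass and looks up 'ST', instead of A's
-- early-returning scan for a line starting with 'ST:' (objective: idiomatic; same cost).

-- ===== PORT A =====
-- scan the lines; on the first line starting with 'ST:' return split(':',1)[1].strip()
-- (the impossible IndexError of [1] is A's bare except: it would return 'Unknown')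
def pvScanA : List String → String
  | [] => "Unknown"
  | line :: rest =>
    if PySem.Str.startswith line "ST:" then
      match (PySem.Str.splitMax? line ":" 1).bind (fun ps => PySem.List.pyGet? ps 1) with
      | some v => PySem.Str.strip v
      | none => "Unknown"
    else pvScanA rest

def extract_upnp_device_type (data : String) : String :=
  match PySem.Str.split? data "\r\n" with
  | some lines => pvScanA lines
  | none => "Unknown"   -- unreachable: the separator "\r\n" is nonempty

-- ===== PORT B =====
-- for each line containing ':', record first-seen value: headers.setdefault(key, value.strip())
def pvHeaderStep (d : PySem.Dict String String) (line : String) : PySem.Dict String String :=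
  if PySem.Str.isIn ":" line then
    match PySem.Str.splitMax? line ":" 1 with
    | some (key :: value :: _) => d.setdefault key (PySem.Str.strip value)
    | _ => d
  else d

def extract_upnp_device_type_alt (data : String) : String :=
  match PySem.Str.split? data "\r\n" with
  | some lines => (lines.foldl pvHeaderStep PySem.Dict.empty).getD "ST" "Unknown"
  | none => "Unknown"   -- unreachable: the separator "\r\n" is nonempty

-- ===== PRECONDITION & SPEC =====
def Spec_extract_upnp_device_type (data : String) (out : String) : Prop := out = extract_upnp_device_type_alt data
instance (data : String) (out : String) : Decidable (Spec_extract_upnp_device_type data out) := by unfold Spec_extract_upnp_device_type; infer_instance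

-- ===== CLAIM (what is proved, stated in full; the proofs are below) =====
def Claim_equal_extract_upnp_device_type : Prop := ∀ (data : String), Dom_extract_upnp_device_type data → Spec_extract_upnp_device_type data (extract_upnp_device_type data)

-- ===== LEMMAS AND PROOFS =====

-- splitOnMax.go with maxsplit exhausted returns the accumulator plus the remainder
theorem pvGo0 (fuel : Nat) (l cur : List Char) (accs : List (List Char)) :
    PySem.Chars.splitOnMax.go [':'] fuel 0 l cur accs = accs.reverse ++ [cur.reverse ++ l] := by
  cases fuel <;> cases l <;> simp [PySem.Chars.splitOnMax.go]

-- characterisation of go at maxsplit = 1 for the separator ':'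
theorem pvGo1 (l : List Char) : ∀ (fuel : Nat) (cur : List Char) (accs : List (List Char)),
    l.length < fuel →
    PySem.Chars.splitOnMax.go [':'] fuel 1 l cur accs =
      if ':' ∈ l then
        accs.reverse ++ [cur.reverse ++ l.takeWhile (· ≠ ':'), (l.dropWhile (· ≠ ':')).drop 1]
      else accs.reverse ++ [cur.reverse ++ l] := by
  induction l with
  | nil =>
    intro fuel cur accs h
    cases fuel with
    | zero => omega
    | succ f => simp [PySem.Chars.splitOnMax.go]
  | cons c rest ih =>
    intro fuel cur accs h
    cases fuel with
    | zero => omega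
    | succ f =>
      by_cases hc : c = ':'
      · subst hc
        have hpre : [':'].isPrefixOf (':' :: rest) = true := by
          simp
        simp only [PySem.Chars.splitOnMax.go, hpre, if_true]
        rw [pvGo0]
        simp
      · have hc' : ¬(':' = c) := fun h' => hc h'.symm
        have hpre : [':'].isPrefixOf (c :: rest) = false := by
          simp [List.isPrefixOf, hc']
        have hrec : PySem.Chars.splitOnMax.go [':'] (f+1) 1 (c :: rest) cur accs =
            PySem.Chars.splitOnMax.go [':'] f 1 rest (c :: cur) accs := by
          simp [PySem.Chars.splitOnMax.go, hpre]
        rw [hrec, ih f (c :: cur) accs (by simp at h; omega)]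
        by_cases hm : ':' ∈ rest
        · simp [hm, hc, hc']
        · simp [hm, hc']

-- Python's line.split(':', 1) in closed form
theorem pvSplitColon1 (l : List Char) :
    PySem.Chars.splitMax? l [':'] 1 =
      some (if ':' ∈ l then [l.takeWhile (· ≠ ':'), (l.dropWhile (· ≠ ':')).drop 1] else [l]) := by
  have hgo : PySem.Chars.splitMax? l [':'] 1 =
      some (PySem.Chars.splitOnMax.go [':'] (l.length + 1) 1 l [] []) := by
    simp [PySem.Chars.splitMax?, PySem.Chars.splitOnMax]
  rw [hgo, pvGo1 l (l.length + 1) [] [] (Nat.lt_succ_self _)]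
  by_cases hm : ':' ∈ l <;> simp [hm]

theorem pvDropWhileColon (l : List Char) (h : ':' ∈ l) :
    l.dropWhile (· ≠ ':') = ':' :: (l.dropWhile (· ≠ ':')).drop 1 := by
  induction l with
  | nil => cases h
  | cons c rest ih =>
    by_cases hc : c = ':'
    · subst hc; simp
    · have h' : ':' ∈ rest := by cases h with | head => exact absurd rfl hc | tail _ h => exact h
      simpa [hc, List.drop_one] using ih h'

-- line.startswith('ST:') ⟺ ':' occurs and the part before the first ':' is exactly "ST"
theorem pvStartswithST (l : List Char) :
    PySem.Chars.startswith l ['S','T',':'] = true ↔ (':' ∈ l ∧ l.takeWhile (· ≠ ':') = ['S','T']) := by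
  constructor
  · intro h
    obtain ⟨t, rfl⟩ := List.isPrefixOf_iff_prefix.mp h
    exact ⟨by simp, by simp⟩
  · rintro ⟨hm, ht⟩
    have hsplit := List.takeWhile_append_dropWhile (p := fun c => decide (c ≠ ':')) (l := l)
    rw [ht] at hsplit
    have hd := pvDropWhileColon l hm
    unfold PySem.Chars.startswith
    rw [List.isPrefixOf_iff_prefix]
    exact ⟨(l.dropWhile (· ≠ ':')).drop 1, by rw [← hsplit]; rw [hd]; rfl⟩

theorem pvMemIsIn (l : List Char) (h : ':' ∈ l) : PySem.Chars.isIn [':'] l = true := by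
  rw [PySem.Chars.isIn_iff_infix]
  obtain ⟨a, b, rfl⟩ := List.append_of_mem h
  exact ⟨a, b, by simp⟩

theorem pvIsInMem (l : List Char) (h : PySem.Chars.isIn [':'] l = true) : ':' ∈ l := by
  rw [PySem.Chars.isIn_iff_infix] at h
  obtain ⟨a, b, rfl⟩ := h
  simp

-- main loop invariant: looking up 'ST' in the fold = first match in d, else A's scan
theorem pvFoldHeaders (lines : List String) : ∀ (d : PySem.Dict String String),
    (lines.foldl pvHeaderStep d).getD "ST" "Unknown" = (d.get? "ST").getD (pvScanA lines) := by
  induction lines with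
  | nil => intro d; simp [pvScanA, PySem.Dict.getD]
  | cons line rest ih =>
    intro d
    have hsm : PySem.Str.splitMax? line ":" 1 =
        some (if ':' ∈ line.toList then
          [String.ofList (line.toList.takeWhile (· ≠ ':')),
           String.ofList ((line.toList.dropWhile (· ≠ ':')).drop 1)]
          else [String.ofList line.toList]) := by
      show Option.map _ (PySem.Chars.splitMax? line.toList ":".toList 1) = _
      rw [show (":".toList) = [':'] from rfl, pvSplitColon1]
      by_cases hm : ':' ∈ line.toList <;> simp [hm]
    have hsw : PySem.Str.startswith line "ST:" = PySem.Chars.startswith line.toList ['S','T',':'] := by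
      rw [PySem.Str.startswith_eq]; rfl
    have hin : PySem.Str.isIn ":" line = PySem.Chars.isIn [':'] line.toList := by
      rw [PySem.Str.isIn_eq]; rfl
    by_cases hST : PySem.Chars.startswith line.toList ['S','T',':'] = true
    · obtain ⟨hm, ht⟩ := (pvStartswithST line.toList).mp hST
      have hkey : String.ofList (line.toList.takeWhile (· ≠ ':')) = "ST" := by rw [ht]
      have hstep : pvHeaderStep d line =
          d.setdefault "ST" (PySem.Str.strip (String.ofList ((line.toList.dropWhile (· ≠ ':')).drop 1))) := by
        unfold pvHeaderStep
        rw [hin, pvMemIsIn _ hm, if_pos rfl, hsm, if_pos hm, hkey]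
      have hscan : pvScanA (line :: rest) =
          PySem.Str.strip (String.ofList ((line.toList.dropWhile (· ≠ ':')).drop 1)) := by
        rw [pvScanA]
        rw [hsw, if_pos hST, hsm, if_pos hm]
        simp [PySem.List.pyGet?, PySem.List.pyIdx?]
      simp only [List.foldl_cons, hstep, ih]
      rw [PySem.Dict.get?_setdefault_self, hscan]
      cases d.get? "ST" <;> simp
    · have hscan : pvScanA (line :: rest) = pvScanA rest := by
        show (if PySem.Str.startswith line "ST:" = true then
            (match (PySem.Str.splitMax? line ":" 1).bind (fun ps => PySem.List.pyGet? ps 1) with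
             | some v => PySem.Str.strip v
             | none => "Unknown")
          else pvScanA rest) = pvScanA rest
        rw [hsw, if_neg (by simp [hST])]
      have hget : (pvHeaderStep d line).get? "ST" = d.get? "ST" := by
        unfold pvHeaderStep
        by_cases hcin : PySem.Chars.isIn [':'] line.toList = true
        · have hm := pvIsInMem _ hcin
          rw [hin, hcin, if_pos rfl, hsm, if_pos hm]
          have hkey : String.ofList (line.toList.takeWhile (· ≠ ':')) ≠ "ST" := by
            intro hk
            exact hST ((pvStartswithST line.toList).mpr ⟨hm, String.ofList_inj.mp (by rw [hk])⟩)
          exact PySem.Dict.get?_setdefault_of_ne d _ (fun h => hkey h.symm)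
        · rw [hin, if_neg (by simpa using hcin)]
      simp only [List.foldl_cons, hscan, ih, hget]

-- ===== VERDICT (by name: the statement is the Claim_ definition above) =====
theorem extract_upnp_device_type_spec : Claim_equal_extract_upnp_device_type := by
  unfold Claim_equal_extract_upnp_device_type
  intro data _
  unfold Spec_extract_upnp_device_type extract_upnp_device_type extract_upnp_device_type_alt
  cases h : PySem.Str.split? data "\r\n" with
  | none => rfl
  | some lines =>
    show pvScanA lines = (lines.foldl pvHeaderStep PySem.Dict.empty).getD "ST" "Unknown"
    rw [pvFoldHeaders lines PySem.Dict.empty, PySem.Dict.get?_empty]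
    rfl
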